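-- pv_equiv track=rewrite | github.com/Sanjay-2004/Elite | day11/1right_height.py | find_right_view
-- ===== SOURCE A (Python) =====
-- def find_right_view(heights):
--     ans = []
--     curmax = heights[len(heights)-1]-1
--
--     for i in range(len(heights)-1,-1,-1):
--         if heights[i]>curmax:
--             ans.append(i)
--             curmax = heights[i]
--     return ans[::-1]
-- ===== SOURCE B (Python) =====
-- def find_right_view(heights):
--     # suffix-maximum pass, then one forward comparison pass (no final reversal)
--     suf = [heights[-1]]
--     for x in reversed(heights[:-1]):
--         suf.append(max(x, suf[-1]))
--     suf.reverse()                      # suf[i] == max(heights[i:])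
--     res = [i for i, (h, m) in enumerate(zip(heights, suf[1:])) if h > m]
--     res.append(len(heights) - 1)
--     return res
-- ===== Notes on version B (the rewrite author's own statement) =====
-- stated objective: alternative
-- what changed: B precomputes a suffix-maximum array right-to-left and then emits visible indices in a single forward comparison pass in increasing order, instead of A's backward running-max scan that collects indices in decreasing order and reverses at the end.
import Mathlib
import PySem

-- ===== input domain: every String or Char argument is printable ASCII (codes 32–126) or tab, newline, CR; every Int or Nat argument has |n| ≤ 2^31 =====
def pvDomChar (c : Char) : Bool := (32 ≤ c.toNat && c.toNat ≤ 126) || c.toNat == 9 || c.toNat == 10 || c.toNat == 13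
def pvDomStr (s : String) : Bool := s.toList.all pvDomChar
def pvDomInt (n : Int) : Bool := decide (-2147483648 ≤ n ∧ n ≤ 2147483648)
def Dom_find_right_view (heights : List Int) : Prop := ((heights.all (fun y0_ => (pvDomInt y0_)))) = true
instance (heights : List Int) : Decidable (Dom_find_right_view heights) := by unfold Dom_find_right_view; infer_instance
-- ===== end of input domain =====

-- B replaces A's backward running-max scan (collect indices descending, then reverse) by a
-- suffix-maximum array plus a single forward comparison pass; alternative decomposition, same cost.


-- ===== PORT A =====
-- loop body of A's backward scan: 'if heights[i] > curmax: ans.append(i); curmax = heights[i]'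
def stepA (h : List Int) (s : List Int × Int) (i : Int) : List Int × Int :=
  if PySem.List.pyGetD h i 0 > s.2 then (s.1 ++ [i], PySem.List.pyGetD h i 0) else s

-- 'ans[::-1]' ported as .reverse (exact: PySem.List.slice?_none_none_neg_one)
def find_right_view (heights : List Int) : List Int :=
  let curmax := PySem.List.pyGetD heights ((heights.length : Int) - 1) 0 - 1
  ((PySem.List.pyRange ((heights.length : Int) - 1) (-1) (-1)).foldl
      (stepA heights) ([], curmax)).1.reverse


-- ===== PORT B =====
def find_right_view_alt (heights : List Int) : List Int :=
  let suf0 : List Int := [PySem.List.pyGetD heights (-1) 0]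
  let sufR := ((PySem.List.slice heights none (some (-1))).reverse).foldl
      (fun acc x => acc ++ [max x (acc.getLastD 0)]) suf0
  let suf := sufR.reverse
  ((PySem.List.enumerate (heights.zip (PySem.List.slice suf (some 1) none)) 0).filter
      (fun p => decide (p.2.1 > p.2.2))).map (fun p => p.1)
    ++ [(heights.length : Int) - 1]


-- ===== PRECONDITION & SPEC =====
-- Pre_ excludes only the empty list, on which A raises IndexError at heights[len(heights)-1] (B raises there too).
def Pre_find_right_view (heights : List Int) : Prop := heights ≠ []
instance (heights : List Int) : Decidable (Pre_find_right_view heights) := by unfold Pre_find_right_view; infer_instance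
def pvWitness_find_right_view : List Int := [3, 1, 2]
def Spec_find_right_view (heights : List Int) (out : List Int) : Prop := out = find_right_view_alt heights
instance (heights : List Int) (out : List Int) : Decidable (Spec_find_right_view heights out) := by unfold Spec_find_right_view; infer_instance

-- ===== CLAIM (what is proved, stated in full; the proofs are below) =====
def Claim_equal_find_right_view : Prop := ∀ (heights : List Int), Dom_find_right_view heights → Pre_find_right_view heights → Spec_find_right_view heights (find_right_view heights)

-- ===== LEMMAS AND PROOFS =====
-- maxT (x :: t) is Python's max(x :: t); maxT [] = 0 is a junk value, never used on []
def maxT : List Int → Int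
  | [] => 0
  | x :: t => t.foldl max x


-- sufSpec h lists maxT of each nonempty suffix of h (B's suffix-maximum array)
def sufSpec : List Int → List Int
  | [] => []
  | x :: t => maxT (x :: t) :: sufSpec t


theorem foldl_max_comm (l : List Int) (a : Int) : ∀ b, l.foldl max (max a b) = max a (l.foldl max b) := by
  induction l with
  | nil => intro b; simp
  | cons y t ih => intro b; simpa [max_assoc] using ih (max b y)

theorem maxT_cons (x y : Int) (ys : List Int) : maxT (x :: y :: ys) = max x (maxT (y :: ys)) := by
  simpa [maxT] using foldl_max_comm ys x y

theorem foldl_max_eq (t : List Int) (ht : t ≠ []) (c : Int) : t.foldl max c = max c (maxT t) := by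
  match t with
  | y :: ys => simpa [maxT] using foldl_max_comm ys c y

theorem getD_last : ∀ (l : List Int), l ≠ [] → ∀ d, l.getD (l.length - 1) d = l.getLastD d := by
  intro l
  induction l with
  | nil => simp
  | cons x t ih =>
    intro _ d
    cases t with
    | nil => rfl
    | cons y ys => simpa using ih (by simp) x

theorem lastD_le_maxT (t : List Int) (ht : t ≠ []) : t.getLastD 0 ≤ maxT t := by
  match t with
  | y :: ys =>
    have hm : (y :: ys).getLastD 0 ∈ y :: ys := List.mem_of_getLast? rfl
    rcases List.mem_cons.mp hm with h | h
    · rw [h]; exact (PySem.List.le_foldl_max ys y).1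
    · exact (PySem.List.le_foldl_max ys y).2 _ h

theorem init_max (t : List Int) (ht : t ≠ []) : t.foldl max (t.getLastD 0 - 1) = maxT t := by
  rw [foldl_max_eq t ht]
  have := lastD_le_maxT t ht
  omega

theorem foldr_max_eq_foldl (t : List Int) : ∀ c, t.foldr max c = t.foldl max c := by
  induction t with
  | nil => intro c; rfl
  | cons y ys ih =>
    intro c
    simp only [List.foldr_cons, List.foldl_cons, ih]
    rw [max_comm c y, foldl_max_comm]


-- A's whole loop, rephrased as a foldr over the ascending index range (A folds over the reversed range)
def Fr (h : List Int) (l : List Int) (c : Int) : List Int × Int :=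
  l.foldr (fun i s => stepA h s i) ([], c)


theorem pyGetD_last (l : List Int) (hl : l ≠ []) (d : Int) :
    PySem.List.pyGetD l ((l.length : Int) - 1) d = l.getLastD d := by
  have h1 : (0:Int) ≤ (l.length : Int) - 1 := by
    have : l.length ≠ 0 := by simpa using hl
    omega
  rw [PySem.List.pyGetD_of_nonneg _ _ h1]
  have h2 : ((l.length : Int) - 1).toNat = l.length - 1 := by omega
  rw [h2, getD_last l hl]

theorem A_eq_Fr (h : List Int) (hn : h ≠ []) :
    find_right_view h = (Fr h (PySem.List.pyRange 0 (h.length : Int) 1) (h.getLastD 0 - 1)).1.reverse := by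
  unfold find_right_view
  rw [pyGetD_last h hn]
  have hr : PySem.List.pyRange ((h.length : Int) - 1) (-1) (-1)
      = (PySem.List.pyRange 0 (h.length : Int) 1).reverse := by
    rw [PySem.List.pyRange_neg_one_eq_reverse]
    norm_num
  rw [hr]
  show (List.foldl (stepA h) ([], h.getLastD 0 - 1)
      ((PySem.List.pyRange 0 (h.length : Int) 1).reverse)).1.reverse = _
  rw [List.foldl_reverse]
  rfl

theorem Fr_shift (x : Int) (t : List Int) : ∀ (l : List Int), (∀ i ∈ l, 0 ≤ i) → ∀ c,
    Fr (x :: t) (l.map (· + 1)) c = (((Fr t l c).1).map (· + 1), (Fr t l c).2) := by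
  intro l
  induction l with
  | nil => intro _ c; simp [Fr]
  | cons i l ih =>
    intro hmem c
    have hi : (0:Int) ≤ i := hmem i (by simp)
    have hget : PySem.List.pyGetD (x :: t) (i + 1) 0 = PySem.List.pyGetD t i 0 := by
      rw [PySem.List.pyGetD_of_nonneg _ _ (by omega), PySem.List.pyGetD_of_nonneg _ _ hi]
      have : (i + 1).toNat = i.toNat + 1 := by omega
      rw [this, List.getD_cons_succ]
    have ihl := ih (fun j hj => hmem j (by simp [hj])) c
    simp only [List.map_cons, Fr, List.foldr_cons] at *
    rw [ihl, stepA, stepA, hget]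
    split_ifs with hc
    · simp
    · simp

theorem Fr_snd (h' : List Int) : ∀ (l : List Int) (c : Int),
    (Fr h' l c).2 = l.foldr (fun i m => max (PySem.List.pyGetD h' i 0) m) c := by
  intro l
  induction l with
  | nil => intro c; rfl
  | cons i l ih =>
    intro c
    simp only [Fr, List.foldr_cons] at *
    rw [← ih c, stepA]
    split_ifs with hc
    · simp; omega
    · simp; omega

theorem range_snd (t : List Int) (c : Int) :
    (PySem.List.pyRange 0 (t.length : Int) 1).foldr (fun i m => max (PySem.List.pyGetD t i 0) m) c
      = t.foldr max c := by
  conv_rhs => rw [← PySem.List.map_pyGetD_pyRange_zero' t 0]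
  rw [List.foldr_map]

theorem Fr_snd_max (t : List Int) (ht : t ≠ []) :
    (Fr t (PySem.List.pyRange 0 (t.length : Int) 1) (t.getLastD 0 - 1)).2 = maxT t := by
  rw [Fr_snd, range_snd, foldr_max_eq_foldl, init_max t ht]

theorem range_shift (n : Nat) :
    PySem.List.pyRange 1 ((n : Int) + 1) 1 = (PySem.List.pyRange 0 (n : Int) 1).map (· + 1) := by
  rw [PySem.List.pyRange_one, PySem.List.pyRange_one]
  have h1 : (((n:Int) + 1) - 1).toNat = n := by omega
  have h2 : ((n:Int) - 0).toNat = n := by omega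
  rw [h1, h2, List.map_map]
  apply List.map_congr_left
  intro k _
  simp [add_comm]

theorem baseA (x : Int) : find_right_view [x] = [0] := by
  unfold find_right_view
  have h1 : (([x] : List Int).length : Int) - 1 = 0 := by simp
  rw [h1]
  have h2 : PySem.List.pyRange 0 (-1) (-1) = [0] := by
    rw [PySem.List.pyRange_neg_one_cons (by omega), PySem.List.pyRange_neg_one_eq_nil (by omega)]
  rw [h2]
  show ((List.foldl (stepA [x]) ([], PySem.List.pyGetD [x] 0 0 - 1) [0]).1).reverse = [0]
  have hx : PySem.List.pyGetD [x] (0:Int) 0 = x := by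
    rw [PySem.List.pyGetD_of_nonneg _ _ le_rfl]; rfl
  simp only [List.foldl_cons, List.foldl_nil, stepA, hx]
  rw [if_pos (by simp)]
  simp

theorem recA (x : Int) (t : List Int) (ht : t ≠ []) :
    find_right_view (x :: t) = (if x > maxT t then [(0:Int)] else []) ++ (find_right_view t).map (· + 1) := by
  rw [A_eq_Fr (x :: t) (by simp), A_eq_Fr t ht]
  have hlast : (x :: t).getLastD 0 = t.getLastD 0 := by
    match t with | y :: ys => simp
  rw [hlast]
  simp only [List.length_cons, Nat.cast_add, Nat.cast_one]
  rw [PySem.List.pyRange_one_cons (by omega), zero_add, range_shift t.length]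
  rw [show Fr (x::t) ((0:Int) :: (PySem.List.pyRange 0 (t.length:Int) 1).map (· + 1)) (t.getLastD 0 - 1)
        = stepA (x::t) (Fr (x::t) ((PySem.List.pyRange 0 (t.length:Int) 1).map (· + 1)) (t.getLastD 0 - 1)) 0 from rfl]
  rw [Fr_shift x t _ (fun i hi => (PySem.List.mem_pyRange_one.mp hi).1)]
  rw [stepA]
  have hx : PySem.List.pyGetD (x :: t) 0 0 = x := by
    rw [PySem.List.pyGetD_of_nonneg _ _ le_rfl]; rfl
  rw [hx]
  rw [show ((Fr t (PySem.List.pyRange 0 (t.length:Int) 1) (t.getLastD 0 - 1)).1.map (· + (1:Int)),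
        (Fr t (PySem.List.pyRange 0 (t.length:Int) 1) (t.getLastD 0 - 1)).2).2
        = (Fr t (PySem.List.pyRange 0 (t.length:Int) 1) (t.getLastD 0 - 1)).2 from rfl]
  rw [Fr_snd_max t ht]
  split_ifs with hc
  · simp
  · simp


theorem getLastD_eq_headD_reverse (l : List Int) (d : Int) : l.getLastD d = l.reverse.headD d := by
  simp [List.getLastD_eq_getLast?, List.head?_reverse]

theorem pyGetD_neg_one (l : List Int) (hl : l ≠ []) (d : Int) :
    PySem.List.pyGetD l (-1) d = l.getLastD d := by
  have hlen : 0 < l.length := List.length_pos_iff.mpr hl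
  rw [PySem.List.pyGetD, PySem.List.pyGet?_neg l (by omega) (by omega)]
  have h1 : l.length - ((-(-1):Int)).toNat = l.length - 1 := by norm_num
  rw [h1, List.getLastD_eq_getLast?, List.getLast?_eq_getElem?]

theorem rev_foldl (l : List Int) : ∀ (acc : List Int), acc ≠ [] →
    (l.foldl (fun a x => a ++ [max x (a.getLastD 0)]) acc).reverse
      = l.foldl (fun r x => max x (r.headD 0) :: r) acc.reverse := by
  induction l with
  | nil => intro acc _; rfl
  | cons x l ih =>
    intro acc hacc
    simp only [List.foldl_cons]
    rw [ih (acc ++ [max x (acc.getLastD 0)]) (by simp)]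
    rw [List.reverse_append, getLastD_eq_headD_reverse]
    rfl

def sufC (h : List Int) : List Int :=
  ((h.dropLast).reverse).foldl (fun r x => max x (r.headD 0) :: r) [h.getLastD 0]

theorem sufC_eq : ∀ (h : List Int), h ≠ [] → sufC h = sufSpec h := by
  intro h
  induction h with
  | nil => simp
  | cons x t ih =>
    intro _
    cases t with
    | nil => simp [sufC, sufSpec, maxT]
    | cons y ys =>
      have hts : (y :: ys) ≠ [] := by simp
      have : sufC (x :: y :: ys)
          = max x ((sufC (y :: ys)).headD 0) :: sufC (y :: ys) := by
        unfold sufC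
        rw [List.dropLast_cons₂, List.reverse_cons, List.foldl_append]
        simp
      rw [this, ih hts]
      have hhead : (sufSpec (y :: ys)).headD 0 = maxT (y :: ys) := by rfl
      rw [hhead, sufSpec, ← maxT_cons]
      rfl

theorem enum_shift {α : Type} (xs : List α) : ∀ (s : Int),
    PySem.List.enumerate xs (s + 1) = (PySem.List.enumerate xs s).map (fun p => (p.1 + 1, p.2)) := by
  induction xs with
  | nil => intro s; simp [PySem.List.enumerate_nil]
  | cons x xs ih => intro s; rw [PySem.List.enumerate_cons, PySem.List.enumerate_cons, ih (s+1)]; simp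

theorem alt_eq (h : List Int) (hn : h ≠ []) :
    find_right_view_alt h
      = ((PySem.List.enumerate (h.zip (sufSpec h).tail) 0).filter
          (fun p => decide (p.2.1 > p.2.2))).map (fun p => p.1) ++ [(h.length : Int) - 1] := by
  unfold find_right_view_alt
  rw [pyGetD_neg_one h hn, PySem.List.slice_to_neg_one]
  show ((PySem.List.enumerate (h.zip (PySem.List.slice
      (((h.dropLast.reverse).foldl (fun acc x => acc ++ [max x (acc.getLastD 0)]) [h.getLastD 0]).reverse)
      (some 1) none)) 0).filter (fun p => decide (p.2.1 > p.2.2))).map (fun p => p.1)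
    ++ [(h.length : Int) - 1] = _
  rw [rev_foldl _ _ (by simp), PySem.List.slice_from_one]
  rw [show (([h.getLastD 0] : List Int)).reverse = [h.getLastD 0] from rfl]
  rw [show h.dropLast.reverse.foldl (fun r x => max x (r.headD 0) :: r) [h.getLastD 0] = sufC h from rfl]
  rw [sufC_eq h hn]

theorem baseB (x : Int) : find_right_view_alt [x] = [0] := by
  rw [alt_eq [x] (by simp)]
  simp [sufSpec, PySem.List.enumerate_nil]

theorem recB (x : Int) (t : List Int) (ht : t ≠ []) :
    find_right_view_alt (x :: t) = (if x > maxT t then [(0:Int)] else []) ++ (find_right_view_alt t).map (· + 1) := by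
  rw [alt_eq (x :: t) (by simp), alt_eq t ht]
  match t with
  | y :: ys =>
    have hzip : (x :: y :: ys).zip (sufSpec (x :: y :: ys)).tail
        = (x, maxT (y :: ys)) :: ((y :: ys).zip (sufSpec (y :: ys)).tail) := by
      simp [sufSpec]
    rw [hzip, PySem.List.enumerate_cons, enum_shift]
    rw [List.filter_cons]
    simp only [List.filter_map]
    have hpred : ((fun p => decide ((p:Int × Int × Int).2.1 > p.2.2)) ∘ (fun p => ((p:Int × Int × Int).1 + 1, p.2)))
        = (fun p => decide ((p:Int × Int × Int).2.1 > p.2.2)) := by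
      funext p; rfl
    rw [hpred]
    have hlen : (((x :: y :: ys).length : Int)) - 1 = (((y :: ys).length : Int) - 1) + 1 := by
      simp [List.length_cons]
    rw [hlen]
    by_cases hc : x > maxT (y :: ys) <;> simp [hc, List.map_map]


theorem A_eq_B : ∀ (h : List Int), h ≠ [] → find_right_view h = find_right_view_alt h := by
  intro h
  induction h with
  | nil => intro hc; exact absurd rfl hc
  | cons x t ih =>
    intro _
    cases t with
    | nil => rw [baseA, baseB]
    | cons y ys => rw [recA x _ (by simp), recB x _ (by simp), ih (by simp)]

-- ===== VERDICT (by name: the statement is the Claim_ definition above) =====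
theorem find_right_view_spec : Claim_equal_find_right_view := by
  intro heights _ hpre
  unfold Spec_find_right_view
  exact A_eq_B heights hpre
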